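-- pv_equiv track=rewrite | github.com/Jhryu30/CodingDiary | 프로그래머스/3/132266. 부대복귀/부대복귀.py | solution
-- ===== SOURCE A (Python) =====
-- from collections import defaultdict, deque
--
-- def solution(n, roads, sources, destination):
--     graph = defaultdict(list)
--     for a,b in roads:
--         graph[a].append(b)
--         graph[b].append(a)
--
--     answer = []
--     visited = [-1 for _ in range(n+1)]
--
--     queue = deque([destination])
--     visited[destination] = 0
--     while queue:
--         v = queue.popleft()
--         for new_v in graph[v]:
--             if visited[new_v]<0:
--                 queue.append(new_v)
--                 visited[new_v] = visited[v]+1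
--
--     answer = [visited[v] for v in sources]
--
--
--     return answer
-- ===== SOURCE B (Python) =====
-- def solution(n, roads, sources, destination):
--     # Bellman-Ford relaxation over the raw edge list: -1 encodes "unreached".
--     dist = [-1] * (n + 1)
--     dist[destination] = 0
--     changed = True
--     while changed:
--         changed = False
--         for a, b in roads:
--             if dist[a] >= 0 and (dist[b] < 0 or dist[a] + 1 < dist[b]):
--                 dist[b] = dist[a] + 1
--                 changed = True
--             if dist[b] >= 0 and (dist[a] < 0 or dist[b] + 1 < dist[a]):
--                 dist[a] = dist[b] + 1
--                 changed = True
--     return [dist[s] for s in sources]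
-- ===== Notes on version B (the rewrite author's own statement) =====
-- stated objective: alternative
-- what changed: Replaces A's BFS graph traversal (adjacency lists + FIFO queue) by Bellman-Ford: no adjacency structure at all, just repeated relaxation sweeps over the raw road list until a sweep changes nothing.
-- outside the precondition, e.g. on solution(5, [(0, -1), (5, 3)], [3], 0): A returns [-1], B returns [2]
import Mathlib
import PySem

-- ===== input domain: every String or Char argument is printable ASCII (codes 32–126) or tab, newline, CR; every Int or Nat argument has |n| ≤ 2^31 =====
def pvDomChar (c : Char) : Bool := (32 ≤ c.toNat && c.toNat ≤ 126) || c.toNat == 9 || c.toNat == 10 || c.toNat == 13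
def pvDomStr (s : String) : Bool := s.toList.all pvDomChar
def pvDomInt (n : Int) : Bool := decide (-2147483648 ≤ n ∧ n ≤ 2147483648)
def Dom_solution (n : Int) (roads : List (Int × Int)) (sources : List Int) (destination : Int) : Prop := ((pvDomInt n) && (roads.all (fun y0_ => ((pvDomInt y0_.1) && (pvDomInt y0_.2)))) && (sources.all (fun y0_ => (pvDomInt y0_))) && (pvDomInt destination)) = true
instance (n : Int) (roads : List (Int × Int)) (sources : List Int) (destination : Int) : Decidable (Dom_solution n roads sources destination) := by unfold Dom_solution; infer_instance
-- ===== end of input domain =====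

-- B replaces A's BFS traversal (adjacency lists + FIFO queue) by Bellman-Ford relaxation sweeps
-- over the raw road list until a sweep changes nothing; objective: alternative algorithm (no speed claim).

-- ===== PORT A =====
-- graph = defaultdict(list); for a,b in roads: graph[a].append(b); graph[b].append(a)
def buildGraph (roads : List (Int × Int)) : PySem.Dict Int (List Int) :=
  roads.foldl (fun g p => (g.modify p.1 [] (· ++ [p.2])).modify p.2 [] (· ++ [p.1])) PySem.Dict.empty

-- body of A's 'for new_v in graph[v]': visited[new_v] < 0 check, append to queue, visited[new_v] = visited[v]+1
-- (state s = (visited, queue); pyGet? = none is where Python raises IndexError — excluded by Pre_)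
def innerA (v : Int) (s : List Int × List Int) (w : Int) : List Int × List Int :=
  match PySem.List.pyGet? s.1 w with
  | some x => if x < 0 then (PySem.List.pySetD s.1 w ((PySem.List.pyGet? s.1 v).getD 0 + 1), s.2 ++ [w]) else s
  | none => s

def stepA (g : PySem.Dict Int (List Int)) (v : Int) (s : List Int × List Int) : List Int × List Int :=
  (g.getD v []).foldl (innerA v) s

-- 'while queue: v = queue.popleft(); …' — fuel is only a totality guard (Lean needs structural recursion);
-- visited.length + 1 pops always suffice, as the equivalence proof shows.
def loopA (g : PySem.Dict Int (List Int)) : Nat → List Int → List Int → List Int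
  | 0, _, vis => vis
  | _ + 1, [], vis => vis
  | fuel + 1, v :: q, vis =>
      let s := stepA g v (vis, q)
      loopA g fuel s.2 s.1

def solution (n : Int) (roads : List (Int × Int)) (sources : List Int) (destination : Int) : List Int :=
  let g := buildGraph roads
  let visited := PySem.List.pySetD (List.replicate (n + 1).toNat (-1)) destination 0
  let res := loopA g (visited.length + 1) [destination] visited
  sources.map (fun v => (PySem.List.pyGet? res v).getD 0)

-- ===== PORT B =====
-- one 'if dist[x] >= 0 and (dist[y] < 0 or dist[x] + 1 < dist[y]): dist[y] = dist[x] + 1' statement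
-- (pyGet? = none is where Python raises IndexError — excluded by Pre_)
def relax1 (dist : List Int) (x y : Int) : List Int × Bool :=
  match PySem.List.pyGet? dist x, PySem.List.pyGet? dist y with
  | some dx, some dy =>
      if 0 ≤ dx ∧ (dy < 0 ∨ dx + 1 < dy) then (PySem.List.pySetD dist y (dx + 1), true)
      else (dist, false)
  | _, _ => (dist, false)

-- body of B's 'for a, b in roads': the two relaxation statements, second one on the updated list
def relaxEdge (s : List Int × Bool) (p : Int × Int) : List Int × Bool :=
  let r1 := relax1 s.1 p.1 p.2
  let r2 := relax1 r1.1 p.2 p.1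
  (r2.1, s.2 || r1.2 || r2.2)

-- one sweep: 'changed = False; for a, b in roads: …'
def roundBF (roads : List (Int × Int)) (dist : List Int) : List Int × Bool :=
  roads.foldl relaxEdge (dist, false)

-- 'while changed:' — fuel is only a totality guard; (n+1)² + 1 sweeps always reach an unchanged
-- sweep, as the equivalence proof shows.
def loopBF (roads : List (Int × Int)) : Nat → List Int → List Int
  | 0, dist => dist
  | fuel + 1, dist =>
      let r := roundBF roads dist
      if r.2 then loopBF roads fuel r.1 else r.1

def solution_alt (n : Int) (roads : List (Int × Int)) (sources : List Int) (destination : Int) : List Int :=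
  let dist := PySem.List.pySetD (List.replicate (n + 1).toNat (-1)) destination 0
  let res := loopBF roads (((n + 1) * (n + 1)).toNat + 1) dist
  sources.map (fun s => (PySem.List.pyGet? res s).getD 0)

-- ===== PRECONDITION & SPEC =====
-- the node ids A's traversal touches: the destination and every road endpoint
def Keys (roads : List (Int × Int)) (destination : Int) : List Int :=
  destination :: roads.flatMap (fun p => [p.1, p.2])

-- the visited-list cell a node id x denotes under Python indexing
def cellId (n x : Int) : Int := if x < 0 then x + (n + 1) else x

-- Pre_ excludes (1) inputs where A raises IndexError (n < 0, or an id outside Python's index range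
-- [-(n+1), n]), and (2) inputs whose graph ids lie outside the problem's node range 0..n in a way that
-- makes two DISTINCT ids denote the SAME visited cell through Python's negative-index aliasing: there
-- A still returns, but the value hangs on which alias its traversal discovers first, a corner no one
-- would specify, and the two algorithms legitimately diverge.
def Pre_solution (n : Int) (roads : List (Int × Int)) (sources : List Int) (destination : Int) : Prop :=
  0 ≤ n ∧ (-(n + 1) ≤ destination ∧ destination ≤ n) ∧
  (∀ p ∈ roads, (-(n + 1) ≤ p.1 ∧ p.1 ≤ n) ∧ (-(n + 1) ≤ p.2 ∧ p.2 ≤ n)) ∧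
  (∀ s ∈ sources, -(n + 1) ≤ s ∧ s ≤ n) ∧
  (∀ x ∈ Keys roads destination, ∀ y ∈ Keys roads destination, cellId n x = cellId n y → x = y)

instance (n : Int) (roads : List (Int × Int)) (sources : List Int) (destination : Int) : Decidable (Pre_solution n roads sources destination) := by unfold Pre_solution; infer_instance

def pvWitness_solution : Int × (List (Int × Int)) × List Int × Int := (2, [(0, 1), (1, 2)], [0, 2], 2)

def Spec_solution (n : Int) (roads : List (Int × Int)) (sources : List Int) (destination : Int) (out : List Int) : Prop := out = solution_alt n roads sources destination
instance (n : Int) (roads : List (Int × Int)) (sources : List Int) (destination : Int) (out : List Int) : Decidable (Spec_solution n roads sources destination out) := by unfold Spec_solution; infer_instance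

-- ===== CLAIM (what is proved, stated in full; the proofs are below) =====
def Claim_equal_solution : Prop := ∀ (n : Int) (roads : List (Int × Int)) (sources : List Int) (destination : Int), Dom_solution n roads sources destination → Pre_solution n roads sources destination → Spec_solution n roads sources destination (solution n roads sources destination)

-- ===== LEMMAS AND PROOFS =====

-- adjacency of the built graph, as a relation
def Adj (g : PySem.Dict Int (List Int)) (u w : Int) : Prop := w ∈ g.getD u []

-- the cell (list position) of id x in a list of length m, matching PySem.List.pyIdx?
def posOf (m : Nat) (x : Int) : Nat := if 0 ≤ x then x.toNat else m - (-x).toNat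

-- number of still-unvisited cells; the termination measure of A's loop
def negCount (vis : List Int) : Nat := vis.countP (fun x => decide (x < 0))

-- number of already-reached cells (for B's value bound)
def finCount (l : List Int) : Nat := l.countP (fun x => decide (0 ≤ x))

-- per-cell rank and total measure of B's loop (-1 counts as m, the largest possible)
def rank (m : Nat) (x : Int) : Int := if x < 0 then (m : Int) else x
def mu (m : Nat) (l : List Int) : Int := (l.map (rank m)).sum

-- the constant context: keys are in range, denote pairwise distinct cells, adjacency stays inside them
structure Ctx (g : PySem.Dict Int (List Int)) (K : List Int) (dest : Int) (m : Nat) : Prop where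
  mpos : 1 ≤ m
  destK : dest ∈ K
  keysRange : ∀ x ∈ K, -(m : Int) ≤ x ∧ x < (m : Int)
  keysInj : ∀ x ∈ K, ∀ y ∈ K, posOf m x = posOf m y → x = y
  adjK : ∀ u w, Adj g u w → u ∈ K ∧ w ∈ K

-- the invariant of A's BFS loop
structure AInv (g : PySem.Dict Int (List Int)) (K : List Int) (dest : Int) (m : Nat) (q vis : List Int) : Prop where
  len : vis.length = m
  lb : ∀ (p : Nat) (c : Int), vis[p]? = some c → -1 ≤ c
  qK : ∀ v ∈ q, v ∈ K
  qS : ∀ v ∈ q, ∃ d, PySem.List.pyGet? vis v = some d ∧ 0 ≤ d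
  sKey : ∀ (p : Nat) (c : Int), vis[p]? = some c → 0 ≤ c → ∃ w ∈ K, posOf m w = p
  zOnly : ∀ (p : Nat), vis[p]? = some 0 → p = posOf m dest
  dZero : PySem.List.pyGet? vis dest = some 0
  closed : ∀ u ∈ K, ∀ du, PySem.List.pyGet? vis u = some du → 0 ≤ du → u ∉ q →
      ∀ w, Adj g u w → ∃ dw, PySem.List.pyGet? vis w = some dw ∧ 0 ≤ dw ∧ dw ≤ du + 1
  par : ∀ (p : Nat) (c : Int), vis[p]? = some c → 1 ≤ c →
      ∃ u w, Adj g u w ∧ posOf m w = p ∧ PySem.List.pyGet? vis u = some (c - 1) ∧ 0 ≤ c - 1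
  mono : q.Pairwise (fun x y => ∀ dx dy, PySem.List.pyGet? vis x = some dx → PySem.List.pyGet? vis y = some dy → dx ≤ dy)
  ub : ∀ (p : Nat) (c : Int), vis[p]? = some c → 0 ≤ c → ∀ v ∈ q, ∀ dv, PySem.List.pyGet? vis v = some dv → c ≤ dv + 1

-- what A's finished visited array satisfies (AInv with an empty queue)
structure AFinal (g : PySem.Dict Int (List Int)) (K : List Int) (dest : Int) (m : Nat) (L : List Int) : Prop where
  len : L.length = m
  lb : ∀ (p : Nat) (c : Int), L[p]? = some c → -1 ≤ c
  dZero : PySem.List.pyGet? L dest = some 0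
  zOnly : ∀ (p : Nat), L[p]? = some 0 → p = posOf m dest
  closed : ∀ u ∈ K, ∀ du, PySem.List.pyGet? L u = some du → 0 ≤ du →
      ∀ w, Adj g u w → ∃ dw, PySem.List.pyGet? L w = some dw ∧ 0 ≤ dw ∧ dw ≤ du + 1
  par : ∀ (p : Nat) (c : Int), L[p]? = some c → 1 ≤ c →
      ∃ u w, Adj g u w ∧ posOf m w = p ∧ PySem.List.pyGet? L u = some (c - 1) ∧ 0 ≤ c - 1

-- the invariant of B's loop, coupled to A's finished array L
structure BInv (K : List Int) (dest : Int) (m : Nat) (L D : List Int) : Prop where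
  len : D.length = m
  lb : ∀ (p : Nat) (c : Int), D[p]? = some c → -1 ≤ c
  dZero : PySem.List.pyGet? D dest = some 0
  lower : ∀ (p : Nat) (c : Int), D[p]? = some c → 0 ≤ c → ∃ lc, L[p]? = some lc ∧ 0 ≤ lc ∧ lc ≤ c
  fin : ∀ (p : Nat) (c : Int), D[p]? = some c → 0 ≤ c → c + 1 ≤ (finCount D : Int)

-- 'no relaxation applies from x to y'
def NR (D : List Int) (x y : Int) : Prop :=
  ∀ dx dy, PySem.List.pyGet? D x = some dx → PySem.List.pyGet? D y = some dy → 0 ≤ dx → 0 ≤ dy ∧ dy ≤ dx + 1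

theorem mem_graph_step (g0 : PySem.Dict Int (List Int)) (a b u w : Int) :
    w ∈ ((g0.modify a [] (· ++ [b])).modify b [] (· ++ [a])).getD u [] ↔
      w ∈ g0.getD u [] ∨ (u = a ∧ w = b) ∨ (u = b ∧ w = a) := by
  simp only [PySem.Dict.getD_modify]
  by_cases hub : u = b <;> by_cases hua : u = a <;> by_cases hba : b = a <;>
    simp_all [List.mem_append]

theorem mem_buildGraph_aux (roads : List (Int × Int)) (g0 : PySem.Dict Int (List Int)) (u w : Int) :
    w ∈ ((roads.foldl (fun g p => (g.modify p.1 [] (· ++ [p.2])).modify p.2 [] (· ++ [p.1])) g0).getD u []) ↔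
      w ∈ g0.getD u [] ∨ (u, w) ∈ roads ∨ (w, u) ∈ roads := by
  induction roads generalizing g0 with
  | nil => simp
  | cons hd tl ih =>
      obtain ⟨a, b⟩ := hd
      rw [List.foldl_cons, ih, mem_graph_step]
      simp only [List.mem_cons, Prod.mk.injEq]
      tauto

theorem mem_buildGraph (roads : List (Int × Int)) (u w : Int) :
    Adj (buildGraph roads) u w ↔ (u, w) ∈ roads ∨ (w, u) ∈ roads := by
  unfold Adj buildGraph
  rw [mem_buildGraph_aux]
  simp [PySem.Dict.getD_empty]

theorem pyIdx?_eq_posOf (m : Nat) (x : Int) (h1 : -(m : Int) ≤ x) (h2 : x < (m : Int)) :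
    PySem.List.pyIdx? m x = some (posOf m x) := by
  unfold PySem.List.pyIdx? posOf
  split_ifs <;> first | rfl | omega

theorem posOf_lt (m : Nat) (x : Int) (h1 : -(m : Int) ≤ x) (h2 : x < (m : Int)) : posOf m x < m := by
  unfold posOf
  split_ifs <;> omega

theorem pyGet?_eq_getElem? (l : List Int) (x : Int) (h1 : -(l.length : Int) ≤ x) (h2 : x < (l.length : Int)) :
    PySem.List.pyGet? l x = l[posOf l.length x]? := by
  unfold PySem.List.pyGet?
  rw [pyIdx?_eq_posOf _ _ h1 h2]
  rfl

theorem pyIdx?_lt {nn : Nat} {i : Int} {k : Nat} (h : PySem.List.pyIdx? nn i = some k) : k < nn := by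
  unfold PySem.List.pyIdx? at h
  split_ifs at h <;> simp_all <;> omega

theorem pyGet?_some {xs : List Int} {i x : Int} (h : PySem.List.pyGet? xs i = some x) :
    ∃ k, PySem.List.pyIdx? xs.length i = some k ∧ k < xs.length ∧ xs[k]? = some x := by
  unfold PySem.List.pyGet? at h
  cases e : PySem.List.pyIdx? xs.length i with
  | none => rw [e] at h; simp at h
  | some k => rw [e] at h; exact ⟨k, rfl, pyIdx?_lt e, h⟩

theorem pySetD_eq {xs : List Int} {i : Int} {k : Nat}
    (e : PySem.List.pyIdx? xs.length i = some k) (y : Int) :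
    PySem.List.pySetD xs i y = xs.set k y := by
  simp [PySem.List.pySetD, PySem.List.pySet?, e]

theorem pySetD_eq_set (l : List Int) (x y : Int) (h1 : -(l.length : Int) ≤ x) (h2 : x < (l.length : Int)) :
    PySem.List.pySetD l x y = l.set (posOf l.length x) y :=
  pySetD_eq (pyIdx?_eq_posOf _ _ h1 h2) y

theorem get_pySetD_self {xs : List Int} {i x : Int} (h : PySem.List.pyGet? xs i = some x) (y : Int) :
    PySem.List.pyGet? (PySem.List.pySetD xs i y) i = some y := by
  obtain ⟨k, e, hk, _⟩ := pyGet?_some h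
  rw [pySetD_eq e y]
  unfold PySem.List.pyGet?
  rw [List.length_set, e]
  simp [List.getElem?_set_self (by simpa using hk)]

theorem get_pySetD_keep {xs : List Int} {i j x c : Int}
    (hi : PySem.List.pyGet? xs i = some x) (hj : PySem.List.pyGet? xs j = some c)
    (hx : x < 0) (hc : 0 ≤ c) (y : Int) :
    PySem.List.pyGet? (PySem.List.pySetD xs i y) j = some c := by
  obtain ⟨ki, ei, hki, exi⟩ := pyGet?_some hi
  obtain ⟨kj, ej, hkj, exj⟩ := pyGet?_some hj
  have hne : ki ≠ kj := by
    intro hkk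
    rw [hkk, exj] at exi
    have : c = x := by simpa using exi
    omega
  rw [pySetD_eq ei y]
  unfold PySem.List.pyGet?
  rw [List.length_set, ej]
  simp [List.getElem?_set_ne hne, exj]

theorem negCount_le_length (vis : List Int) : negCount vis ≤ vis.length :=
  List.countP_le_length

theorem negCount_pySetD {xs : List Int} {i x : Int} (h : PySem.List.pyGet? xs i = some x)
    (hx : x < 0) {y : Int} (hy : 0 ≤ y) :
    negCount (PySem.List.pySetD xs i y) + 1 = negCount xs := by
  obtain ⟨k, e, hk, ex⟩ := pyGet?_some h
  have hxk : xs[k] = x := by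
    rw [List.getElem?_eq_getElem hk] at ex; exact Option.some.inj ex
  have hmem : x ∈ xs := hxk ▸ List.getElem_mem hk
  have hpos : 0 < xs.countP (fun z => decide (z < 0)) :=
    List.countP_pos_iff.2 ⟨x, hmem, by simp [hx]⟩
  have h2 : (decide (y < 0)) = false := by simp only [decide_eq_false_iff_not]; omega
  rw [pySetD_eq e y]
  unfold negCount
  rw [List.countP_set hk, hxk]
  simp [hx, h2]
  omega

theorem pyGet?_pos (m : Nat) (l : List Int) (x : Int) (hl : l.length = m)
    (h1 : -(m : Int) ≤ x) (h2 : x < (m : Int)) :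
    PySem.List.pyGet? l x = l[posOf m x]? := by
  subst hl; exact pyGet?_eq_getElem? l x h1 h2

theorem pySetD_pos (m : Nat) (l : List Int) (x y : Int) (hl : l.length = m)
    (h1 : -(m : Int) ≤ x) (h2 : x < (m : Int)) :
    PySem.List.pySetD l x y = l.set (posOf m x) y := by
  subst hl; exact pySetD_eq_set l x y h1 h2

theorem foldA_step (g : PySem.Dict Int (List Int)) (m : Nat) (v dv : Int) (hdv : 0 ≤ dv) :
    ∀ (ns vis q : List Int),
      vis.length = m →
      PySem.List.pyGet? vis v = some dv →
      (∀ (p : Nat) (c : Int), vis[p]? = some c → 0 ≤ c → c ≤ dv + 1) →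
      (∀ w ∈ ns, -(m : Int) ≤ w ∧ w < (m : Int)) →
      ∃ vis' app,
        ns.foldl (innerA v) (vis, q) = (vis', q ++ app) ∧
        vis'.length = vis.length ∧
        (∀ x c, PySem.List.pyGet? vis x = some c → 0 ≤ c → PySem.List.pyGet? vis' x = some c) ∧
        (∀ (p : Nat), vis'[p]? = vis[p]? ∨
           (∃ c, vis[p]? = some c ∧ c < 0 ∧ vis'[p]? = some (dv + 1) ∧ ∃ w ∈ app, posOf m w = p)) ∧
        (∀ w ∈ app, w ∈ ns ∧ PySem.List.pyGet? vis' w = some (dv + 1)) ∧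
        (∀ w ∈ ns, ∃ dw, PySem.List.pyGet? vis' w = some dw ∧ 0 ≤ dw ∧ dw ≤ dv + 1) ∧
        negCount vis' + app.length = negCount vis := by
  intro ns
  induction ns with
  | nil =>
      intro vis q hlen hv hub hrange
      refine ⟨vis, [], by simp, rfl, fun _ _ h _ => h, fun p => Or.inl rfl, by simp, by simp, by simp⟩
  | cons w ns ih =>
      intro vis q hlen hv hub hrange
      have hwr := hrange w (List.mem_cons_self ..)
      have hget : PySem.List.pyGet? vis w = vis[posOf m w]? := pyGet?_pos m vis w hlen hwr.1 hwr.2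
      have hplt : posOf m w < vis.length := hlen ▸ posOf_lt m w hwr.1 hwr.2
      obtain ⟨x, e⟩ : ∃ x, PySem.List.pyGet? vis w = some x := by
        rw [hget]; exact ⟨_, List.getElem?_eq_getElem hplt⟩
      rw [List.foldl_cons]
      by_cases hx : x < 0
      · have hstep : innerA v (vis, q) w = (PySem.List.pySetD vis w (dv + 1), q ++ [w]) := by
          simp [innerA, e, hx, hv]
        rw [hstep]
        set vis1 := PySem.List.pySetD vis w (dv + 1) with hvis1
        have hset : vis1 = vis.set (posOf m w) (dv + 1) := pySetD_pos m vis w (dv + 1) hlen hwr.1 hwr.2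
        have hlen1 : vis1.length = m := by rw [hset, List.length_set, hlen]
        have hv1 : PySem.List.pyGet? vis1 v = some dv := get_pySetD_keep e hv hx hdv (dv + 1)
        have hub1 : ∀ (p : Nat) (c : Int), vis1[p]? = some c → 0 ≤ c → c ≤ dv + 1 := by
          intro p c hc h0
          by_cases hp : p = posOf m w
          · subst hp
            rw [hset, List.getElem?_set_self hplt] at hc
            have := Option.some.inj hc; omega
          · rw [hset, List.getElem?_set_ne (fun hh => hp hh.symm)] at hc
            exact hub p c hc h0
        obtain ⟨vis', app, heq, hlen', hpres, hchar, happ, hns, hcnt⟩ :=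
          ih vis1 (q ++ [w]) hlen1 hv1 hub1 (fun u hu => hrange u (List.mem_cons_of_mem _ hu))
        have hw1 : PySem.List.pyGet? vis1 w = some (dv + 1) := get_pySetD_self e (dv + 1)
        have hw' : PySem.List.pyGet? vis' w = some (dv + 1) := hpres w (dv + 1) hw1 (by omega)
        refine ⟨vis', w :: app, ?_, ?_, ?_, ?_, ?_, ?_, ?_⟩
        · rw [heq]; simp
        · rw [hlen', hlen1, hlen]
        · intro x' c hx' hc
          exact hpres x' c (get_pySetD_keep e hx' hx hc (dv + 1)) hc
        · intro p
          by_cases hp : p = posOf m w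
          · subst hp
            right
            have hvp : vis[posOf m w]? = some x := hget ▸ e
            have h1p : vis1[posOf m w]? = some (dv + 1) := by
              rw [hset]; exact List.getElem?_set_self hplt
            rcases hchar (posOf m w) with h | ⟨c, hc, hclt, _, _⟩
            · exact ⟨x, hvp, hx, by rw [h, h1p], w, List.mem_cons_self .., rfl⟩
            · rw [h1p] at hc; have := Option.some.inj hc; omega
          · have h1p : vis1[p]? = vis[p]? := by
              rw [hset]; exact List.getElem?_set_ne (fun hh => hp hh.symm)
            rcases hchar p with h | ⟨c, hc, hclt, hc', ww, hww, hpw⟩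
            · left; rw [h, h1p]
            · right; exact ⟨c, h1p ▸ hc, hclt, hc', ww, List.mem_cons_of_mem _ hww, hpw⟩
        · intro u hu
          rcases List.mem_cons.1 hu with h | h
          · subst h; exact ⟨List.mem_cons_self .., hw'⟩
          · obtain ⟨h1, h2⟩ := happ u h
            exact ⟨List.mem_cons_of_mem _ h1, h2⟩
        · intro u hu
          rcases List.mem_cons.1 hu with h | h
          · subst h; exact ⟨dv + 1, hw', by omega, le_refl _⟩
          · exact hns u h
        · have h1 : negCount vis1 + 1 = negCount vis := negCount_pySetD e hx (by omega)
          simp only [List.length_cons]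
          omega
      · have hstep : innerA v (vis, q) w = (vis, q) := by
          simp [innerA, e, hx]
        rw [hstep]
        obtain ⟨vis', app, heq, hlen', hpres, hchar, happ, hns, hcnt⟩ :=
          ih vis q hlen hv hub (fun u hu => hrange u (List.mem_cons_of_mem _ hu))
        refine ⟨vis', app, heq, hlen', hpres, hchar, ?_, ?_, hcnt⟩
        · intro u hu
          obtain ⟨h1, h2⟩ := happ u hu
          exact ⟨List.mem_cons_of_mem _ h1, h2⟩
        · intro u hu
          rcases List.mem_cons.1 hu with h | h
          · subst h
            have h0 : 0 ≤ x := by omega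
            refine ⟨x, hpres u x e h0, h0, ?_⟩
            exact hub (posOf m u) x (hget ▸ e) h0
          · exact hns u h

theorem stepAInv (g : PySem.Dict Int (List Int)) (K : List Int) (dest : Int) (m : Nat)
    (ctx : Ctx g K dest m) (v : Int) (q' vis : List Int)
    (inv : AInv g K dest m (v :: q') vis) :
    ∃ vis' app, stepA g v (vis, q') = (vis', q' ++ app) ∧
      AInv g K dest m (q' ++ app) vis' ∧
      (q' ++ app).length + negCount vis' + 1 = (v :: q').length + negCount vis := by
  obtain ⟨dv, hv, hdv⟩ := inv.qS v (List.mem_cons_self ..)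
  have hvK : v ∈ K := inv.qK v (List.mem_cons_self ..)
  have hub : ∀ (p : Nat) (c : Int), vis[p]? = some c → 0 ≤ c → c ≤ dv + 1 :=
    fun p c hc h0 => inv.ub p c hc h0 v (List.mem_cons_self ..) dv hv
  have hrange : ∀ w ∈ g.getD v [], -(m : Int) ≤ w ∧ w < (m : Int) :=
    fun w hw => ctx.keysRange w (ctx.adjK v w hw).2
  obtain ⟨vis', app, heq, hlen', hpres, hchar, happ, hns, hcnt⟩ :=
    foldA_step g m v dv hdv (g.getD v []) vis q' inv.len hv hub hrange
  have hlenm : vis'.length = m := hlen'.trans inv.len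
  have happK : ∀ w ∈ app, w ∈ K := fun w hw => (ctx.adjK v w (happ w hw).1).2
  have convV : ∀ u ∈ K, PySem.List.pyGet? vis u = vis[posOf m u]? := fun u hu =>
    pyGet?_pos m vis u inv.len (ctx.keysRange u hu).1 (ctx.keysRange u hu).2
  have convV' : ∀ u ∈ K, PySem.List.pyGet? vis' u = vis'[posOf m u]? := fun u hu =>
    pyGet?_pos m vis' u hlenm (ctx.keysRange u hu).1 (ctx.keysRange u hu).2
  refine ⟨vis', app, by rw [stepA, heq], ?_, ?_⟩
  · refine ⟨hlenm, ?_, ?_, ?_, ?_, ?_, ?_, ?_, ?_, ?_, ?_⟩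
    · -- lb
      intro p c hc
      rcases hchar p with h | ⟨c', _, _, h', _⟩
      · exact inv.lb p c (h ▸ hc)
      · rw [h'] at hc; have := Option.some.inj hc; omega
    · -- qK
      intro u hu
      rcases List.mem_append.1 hu with h | h
      · exact inv.qK u (List.mem_cons_of_mem _ h)
      · exact happK u h
    · -- qS
      intro u hu
      rcases List.mem_append.1 hu with h | h
      · obtain ⟨d, hd, h0⟩ := inv.qS u (List.mem_cons_of_mem _ h)
        exact ⟨d, hpres u d hd h0, h0⟩
      · exact ⟨dv + 1, (happ u h).2, by omega⟩
    · -- sKey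
      intro p c hc h0
      rcases hchar p with h | ⟨c', _, _, _, w, hw, hpw⟩
      · exact inv.sKey p c (h ▸ hc) h0
      · exact ⟨w, happK w hw, hpw⟩
    · -- zOnly
      intro p hp
      rcases hchar p with h | ⟨c', _, _, h', _⟩
      · exact inv.zOnly p (h ▸ hp)
      · rw [h'] at hp; have := Option.some.inj hp; omega
    · -- dZero
      exact hpres dest 0 inv.dZero (le_refl 0)
    · -- closed
      intro u huK du hdu h0 hnotin w hAdj
      have hpu := convV' u huK
      rcases hchar (posOf m u) with h | ⟨c, hcv, hclt, hc', w', hw'app, hw'pos⟩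
      · have hold : PySem.List.pyGet? vis u = some du := by
          rw [convV u huK, ← h, ← hpu]; exact hdu
        by_cases huv : u = v
        · subst huv
          have hdudv : du = dv := by
            rw [hv] at hold; exact (Option.some.inj hold).symm
          obtain ⟨dw, hw, h0w, hlew⟩ := hns w hAdj
          exact ⟨dw, hw, h0w, by omega⟩
        · have hnq : u ∉ v :: q' := by
            intro hmem
            rcases List.mem_cons.1 hmem with h' | h'
            · exact huv h'
            · exact hnotin (List.mem_append_left _ h')
          obtain ⟨dw, hw, h0w, hlew⟩ := inv.closed u huK du hold h0 hnq w hAdj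
          exact ⟨dw, hpres w dw hw h0w, h0w, hlew⟩
      · exfalso
        have hw'K : w' ∈ K := happK w' hw'app
        have : u = w' := ctx.keysInj u huK w' hw'K hw'pos.symm
        exact hnotin (List.mem_append_right _ (this ▸ hw'app))
    · -- par
      intro p c hc h1
      rcases hchar p with h | ⟨c', hc', hlt', hnew, w, hw, hpw⟩
      · obtain ⟨u, w, hadj, hpw, hpu, h0⟩ := inv.par p c (h ▸ hc) h1
        exact ⟨u, w, hadj, hpw, hpres u (c - 1) hpu h0, h0⟩
      · have hcval : c = dv + 1 := by
          rw [hnew] at hc; exact (Option.some.inj hc).symm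
        refine ⟨v, w, (happ w hw).1, hpw, ?_, by omega⟩
        have : PySem.List.pyGet? vis' v = some dv := hpres v dv hv hdv
        rw [this]; congr 1; omega
    · -- mono
      rw [List.pairwise_append]
      refine ⟨?_, ?_, ?_⟩
      · refine (inv.mono.of_cons).imp_of_mem ?_
        intro a b ha hb hr dx dy hdx hdy
        obtain ⟨da, hda, h0a⟩ := inv.qS a (List.mem_cons_of_mem _ ha)
        obtain ⟨db, hdb, h0b⟩ := inv.qS b (List.mem_cons_of_mem _ hb)
        have hdx' := hpres a da hda h0a
        have hdy' := hpres b db hdb h0b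
        rw [hdx'] at hdx; rw [hdy'] at hdy
        have e1 := Option.some.inj hdx
        have e2 := Option.some.inj hdy
        subst e1; subst e2
        exact hr da db hda hdb
      · refine List.pairwise_of_forall_mem_list ?_
        intro a ha b hb dx dy hdx hdy
        rw [(happ a ha).2] at hdx
        rw [(happ b hb).2] at hdy
        have := Option.some.inj hdx
        have := Option.some.inj hdy
        omega
      · intro a ha b hb dx dy hdx hdy
        have haK : a ∈ K := inv.qK a (List.mem_cons_of_mem _ ha)
        obtain ⟨da, hda, h0a⟩ := inv.qS a (List.mem_cons_of_mem _ ha)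
        have hdx' := hpres a da hda h0a
        rw [hdx'] at hdx
        have e1 := Option.some.inj hdx
        subst e1
        rw [(happ b hb).2] at hdy
        have e2 := Option.some.inj hdy
        subst e2
        have : vis[posOf m a]? = some da := by rw [← convV a haK]; exact hda
        have := hub (posOf m a) da this h0a
        omega
    · -- ub
      intro p c hc h0 v' hv' dv' hdv'
      rcases List.mem_append.1 hv' with hq | hap
      · obtain ⟨d0, hd0, h00⟩ := inv.qS v' (List.mem_cons_of_mem _ hq)
        have := hpres v' d0 hd0 h00
        rw [this] at hdv'
        have e := Option.some.inj hdv'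
        subst e
        have hdvd0 : dv ≤ d0 :=
          (List.pairwise_cons.1 inv.mono).1 v' hq dv d0 hv hd0
        rcases hchar p with h | ⟨c', _, _, hnew, _⟩
        · exact inv.ub p c (h ▸ hc) h0 v' (List.mem_cons_of_mem _ hq) d0 hd0
        · rw [hnew] at hc
          have := Option.some.inj hc
          omega
      · rw [(happ v' hap).2] at hdv'
        have e := Option.some.inj hdv'
        subst e
        rcases hchar p with h | ⟨c', _, _, hnew, _⟩
        · have := hub p c (h ▸ hc) h0
          omega
        · rw [hnew] at hc
          have := Option.some.inj hc
          omega
  · simp only [List.length_append, List.length_cons]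
    omega

theorem AInv_final (g : PySem.Dict Int (List Int)) (K : List Int) (dest : Int) (m : Nat)
    (vis : List Int) (inv : AInv g K dest m [] vis) : AFinal g K dest m vis :=
  ⟨inv.len, inv.lb, inv.dZero, inv.zOnly,
   fun u hK du hdu h0 w hAdj => inv.closed u hK du hdu h0 (by simp) w hAdj,
   inv.par⟩

theorem loopA_final (g : PySem.Dict Int (List Int)) (K : List Int) (dest : Int) (m : Nat)
    (ctx : Ctx g K dest m) :
    ∀ (fuel : Nat) (q vis : List Int), AInv g K dest m q vis →
      q.length + negCount vis ≤ fuel → AFinal g K dest m (loopA g fuel q vis) := by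
  intro fuel
  induction fuel with
  | zero =>
      intro q vis inv hm
      have hq : q = [] := List.length_eq_zero_iff.1 (by omega)
      subst hq
      exact AInv_final g K dest m vis inv
  | succ fuel ih =>
      intro q vis inv hm
      cases q with
      | nil => exact AInv_final g K dest m vis inv
      | cons v q' =>
          obtain ⟨vis', app, heq, inv', hcnt⟩ := stepAInv g K dest m ctx v q' vis inv
          show AFinal g K dest m (loopA g fuel (stepA g v (vis, q')).2 (stepA g v (vis, q')).1)
          rw [heq]
          refine ih (q' ++ app) vis' inv' ?_
          simp only [List.length_append, List.length_cons] at hcnt hm ⊢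
          omega

theorem replicate_entry (m p : Nat) : (List.replicate m (-1 : Int))[p]? = if p < m then some (-1) else none := by
  simp [List.getElem?_replicate]

theorem initAInv (g : PySem.Dict Int (List Int)) (K : List Int) (dest : Int) (m : Nat)
    (ctx : Ctx g K dest m) :
    AInv g K dest m [dest] (PySem.List.pySetD (List.replicate m (-1)) dest 0) := by
  have hr := ctx.keysRange dest ctx.destK
  have hlrep : (List.replicate m (-1 : Int)).length = m := by simp
  have hset : PySem.List.pySetD (List.replicate m (-1 : Int)) dest 0 =
      (List.replicate m (-1 : Int)).set (posOf m dest) 0 :=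
    pySetD_pos m _ dest 0 hlrep hr.1 hr.2
  set pd := posOf m dest with hpd
  have hpdlt : pd < m := posOf_lt m dest hr.1 hr.2
  set vis1 := PySem.List.pySetD (List.replicate m (-1 : Int)) dest 0 with hvis1
  have hlen : vis1.length = m := by rw [hset, List.length_set, hlrep]
  have hentry : ∀ p : Nat, vis1[p]? = if p = pd then some 0 else (if p < m then some (-1) else none) := by
    intro p
    by_cases hp : p = pd
    · subst hp
      rw [hset, List.getElem?_set_self (by rw [hlrep]; exact hpdlt)]
      simp
    · rw [hset, List.getElem?_set_ne (fun hh => hp hh.symm), replicate_entry]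
      simp [hp]
  have hdz : PySem.List.pyGet? vis1 dest = some 0 := by
    rw [pyGet?_pos m vis1 dest hlen hr.1 hr.2, hentry, if_pos rfl]
  refine ⟨hlen, ?_, ?_, ?_, ?_, ?_, hdz, ?_, ?_, ?_, ?_⟩
  · intro p c hc
    rw [hentry] at hc
    split_ifs at hc <;> (have := Option.some.inj hc; omega)
  · intro u hu
    rcases List.mem_singleton.1 hu with rfl
    exact ctx.destK
  · intro u hu
    rcases List.mem_singleton.1 hu with rfl
    exact ⟨0, hdz, le_refl 0⟩
  · intro p c hc h0
    rw [hentry] at hc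
    split_ifs at hc with h1
    · exact ⟨dest, ctx.destK, h1.symm⟩
    · exfalso; have := Option.some.inj hc; omega
  · intro p hp
    rw [hentry] at hp
    split_ifs at hp with h1
    · exact h1
    · exfalso; have := Option.some.inj hp; omega
  · intro u huK du hdu h0 hnotin w hAdj
    exfalso
    have hur := ctx.keysRange u huK
    rw [pyGet?_pos m vis1 u hlen hur.1 hur.2, hentry] at hdu
    split_ifs at hdu with h1
    · exact hnotin (List.mem_singleton.2 (ctx.keysInj u huK dest ctx.destK h1))
    · have := Option.some.inj hdu; omega
  · intro p c hc h1
    rw [hentry] at hc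
    split_ifs at hc <;> (exfalso; have := Option.some.inj hc; omega)
  · exact List.pairwise_singleton _ _
  · intro p c hc h0 v' hv' dv' hdv'
    rcases List.mem_singleton.1 hv' with rfl
    rw [hdz] at hdv'
    have e := Option.some.inj hdv'
    rw [hentry] at hc
    split_ifs at hc with h1
    · have := Option.some.inj hc; omega
    · have := Option.some.inj hc; omega

theorem sum_set_int (l : List Int) (p : Nat) (a c : Int) (hc : l[p]? = some c) :
    (l.set p a).sum = l.sum - c + a := by
  induction l generalizing p with
  | nil => simp at hc
  | cons h t ih =>
      cases p with
      | zero =>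
          simp only [List.getElem?_cons_zero] at hc
          have := Option.some.inj hc
          subst this
          simp [List.set]
          ring
      | succ p =>
          simp only [List.getElem?_cons_succ] at hc
          simp only [List.set, List.sum_cons]
          rw [ih p hc]
          ring

theorem mu_set (m : Nat) (l : List Int) (p : Nat) (a c : Int) (hc : l[p]? = some c) :
    mu m (l.set p a) = mu m l - rank m c + rank m a := by
  unfold mu
  rw [List.map_set]
  exact sum_set_int (l.map (rank m)) p (rank m a) (rank m c) (by simp [List.getElem?_map, hc])

theorem rank_nonneg (m : Nat) (x : Int) : 0 ≤ rank m x := by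
  unfold rank; split_ifs <;> omega

theorem mu_nonneg (m : Nat) (l : List Int) : 0 ≤ mu m l :=
  List.sum_nonneg (by
    intro x hx
    obtain ⟨y, _, rfl⟩ := List.mem_map.1 hx
    exact rank_nonneg m y)

theorem mu_le (m : Nat) (l : List Int) (h : ∀ x ∈ l, rank m x ≤ (m : Int)) :
    mu m l ≤ (l.length : Int) * m := by
  unfold mu
  have := List.sum_le_card_nsmul (l.map (rank m)) (m : Int) (by
    intro x hx
    obtain ⟨y, hy, rfl⟩ := List.mem_map.1 hx
    exact h y hy)
  simpa using this

theorem finCount_lt_of_neg (D : List Int) (p : Nat) (dy : Int) (hdy : D[p]? = some dy)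
    (hneg : dy < 0) : finCount D < D.length := by
  have hle : finCount D ≤ D.length := List.countP_le_length
  rcases Nat.lt_or_ge (finCount D) D.length with h | h
  · exact h
  · exfalso
    have heq : finCount D = D.length := le_antisymm hle h
    have := List.countP_eq_length.mp heq dy (List.mem_of_getElem? hdy)
    simp at this
    omega

theorem finCount_set (D : List Int) (p : Nat) (a dy : Int) (hdy : D[p]? = some dy) :
    (finCount (D.set p a) : Int) = (finCount D : Int) - (if 0 ≤ dy then 1 else 0) + (if 0 ≤ a then 1 else 0) := by
  have hp : p < D.length := by
    by_contra h
    rw [List.getElem?_eq_none (by omega)] at hdy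
    simp at hdy
  have hval : D[p] = dy := by
    rw [List.getElem?_eq_getElem hp] at hdy
    exact Option.some.inj hdy
  have hmem : dy ∈ D := hval ▸ List.getElem_mem hp
  unfold finCount
  rw [List.countP_set hp, hval]
  by_cases h1 : 0 ≤ dy <;> by_cases h2 : 0 ≤ a
  · have hpos : 0 < D.countP (fun x => decide (0 ≤ x)) :=
      List.countP_pos_iff.2 ⟨dy, hmem, by simp [h1]⟩
    simp [h1, h2]
    omega
  · have hpos : 0 < D.countP (fun x => decide (0 ≤ x)) :=
      List.countP_pos_iff.2 ⟨dy, hmem, by simp [h1]⟩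
    simp [h1, h2]
    omega
  · simp [h1, h2]
  · simp [h1, h2]

theorem relax1_spec (g : PySem.Dict Int (List Int)) (K : List Int) (dest : Int) (m : Nat)
    (L : List Int) (ctx : Ctx g K dest m) (fl : AFinal g K dest m L)
    (D : List Int) (x y : Int) (hxK : x ∈ K) (hyK : y ∈ K) (hadj : Adj g x y)
    (inv : BInv K dest m L D) :
    BInv K dest m L (relax1 D x y).1 ∧
    ((relax1 D x y).2 = false → (relax1 D x y).1 = D ∧ NR D x y) ∧
    ((relax1 D x y).2 = true → mu m (relax1 D x y).1 < mu m D) := by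
  have hxr := ctx.keysRange x hxK
  have hyr := ctx.keysRange y hyK
  have hdr := ctx.keysRange dest ctx.destK
  set px := posOf m x with hpx
  set py := posOf m y with hpy
  have hpxlt : px < D.length := inv.len ▸ posOf_lt m x hxr.1 hxr.2
  have hpylt : py < D.length := inv.len ▸ posOf_lt m y hyr.1 hyr.2
  have hgx : PySem.List.pyGet? D x = D[px]? := pyGet?_pos m D x inv.len hxr.1 hxr.2
  have hgy : PySem.List.pyGet? D y = D[py]? := pyGet?_pos m D y inv.len hyr.1 hyr.2
  obtain ⟨dx, hdx⟩ : ∃ dx, D[px]? = some dx := ⟨_, List.getElem?_eq_getElem hpxlt⟩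
  obtain ⟨dy, hdy⟩ : ∃ dy, D[py]? = some dy := ⟨_, List.getElem?_eq_getElem hpylt⟩
  have hgx' : PySem.List.pyGet? D x = some dx := by rw [hgx, hdx]
  have hgy' : PySem.List.pyGet? D y = some dy := by rw [hgy, hdy]
  by_cases hcond : 0 ≤ dx ∧ (dy < 0 ∨ dx + 1 < dy)
  · -- the relaxation fires
    have hred : relax1 D x y = (PySem.List.pySetD D y (dx + 1), true) := by
      rw [relax1, hgx', hgy']
      simp [hcond]
    rw [hred]
    have hDset : PySem.List.pySetD D y (dx + 1) = D.set py (dx + 1) :=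
      pySetD_pos m D y (dx + 1) inv.len hyr.1 hyr.2
    have hlen' : (PySem.List.pySetD D y (dx + 1)).length = m := by
      rw [hDset, List.length_set, inv.len]
    have hpyne : py ≠ posOf m dest := by
      intro he
      have hgd : PySem.List.pyGet? D dest = D[posOf m dest]? := pyGet?_pos m D dest inv.len hdr.1 hdr.2
      rw [inv.dZero] at hgd
      rw [← he, hdy] at hgd
      have := Option.some.inj hgd
      omega
    refine ⟨⟨hlen', ?_, ?_, ?_, ?_⟩, ?_, ?_⟩
    · -- lb
      intro p c hc
      rw [hDset] at hc
      by_cases hp : p = py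
      · subst hp
        rw [List.getElem?_set_self hpylt] at hc
        have := Option.some.inj hc
        omega
      · rw [List.getElem?_set_ne (fun hh => hp hh.symm)] at hc
        exact inv.lb p c hc
    · -- dZero
      have hgd' : PySem.List.pyGet? (PySem.List.pySetD D y (dx + 1)) dest =
          (PySem.List.pySetD D y (dx + 1))[posOf m dest]? :=
        pyGet?_pos m _ dest hlen' hdr.1 hdr.2
      rw [hgd', hDset, List.getElem?_set_ne hpyne]
      have hgd : PySem.List.pyGet? D dest = D[posOf m dest]? := pyGet?_pos m D dest inv.len hdr.1 hdr.2
      rw [← hgd]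
      exact inv.dZero
    · -- lower
      intro p c hc h0
      rw [hDset] at hc
      by_cases hp : p = py
      · subst hp
        rw [List.getElem?_set_self hpylt] at hc
        have hceq := Option.some.inj hc
        obtain ⟨lx, hLx, h0lx, hlex⟩ := inv.lower px dx hdx hcond.1
        have hLxg : PySem.List.pyGet? L x = some lx := by
          rw [pyGet?_pos m L x fl.len hxr.1 hxr.2, hLx]
        obtain ⟨dw, hLy, h0w, hlew⟩ := fl.closed x hxK lx hLxg h0lx y hadj
        have hLyg : L[py]? = some dw := by
          rw [← pyGet?_pos m L y fl.len hyr.1 hyr.2, hLy]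
        exact ⟨dw, hLyg, h0w, by omega⟩
      · rw [List.getElem?_set_ne (fun hh => hp hh.symm)] at hc
        exact inv.lower p c hc h0
    · -- fin
      intro p c hc h0
      rw [hDset] at hc ⊢
      have hfc := finCount_set D py (dx + 1) dy hdy
      by_cases hp : p = py
      · subst hp
        rw [List.getElem?_set_self hpylt] at hc
        have hceq := Option.some.inj hc
        rcases hcond.2 with hneg | hlt
        · have := inv.fin px dx hdx hcond.1
          rw [hfc]
          split_ifs at * <;> omega
        · have := inv.fin py dy hdy (by omega)
          rw [hfc]
          split_ifs at * <;> omega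
      · rw [List.getElem?_set_ne (fun hh => hp hh.symm)] at hc
        have := inv.fin p c hc h0
        rw [hfc]
        split_ifs at * <;> omega
    · -- flag false (vacuous)
      intro h
      simp at h
    · -- flag true: strict measure decrease
      intro _
      simp only [hDset]
      rw [mu_set m D py (dx + 1) dy hdy]
      have hrk1 : rank m (dx + 1) = dx + 1 := by
        unfold rank; rw [if_neg (by omega)]
      rcases hcond.2 with hneg | hlt
      · have hrk2 : rank m dy = (m : Int) := by
          unfold rank; rw [if_pos hneg]
        have hfin := inv.fin px dx hdx hcond.1
        have hflt : finCount D < D.length := finCount_lt_of_neg D py dy hdy hneg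
        rw [hrk1, hrk2]
        have : (finCount D : Int) < (m : Int) := by
          rw [← inv.len]; exact_mod_cast hflt
        omega
      · have hrk2 : rank m dy = dy := by
          unfold rank; rw [if_neg (by omega)]
        rw [hrk1, hrk2]
        omega
  · -- no relaxation
    have hred : relax1 D x y = (D, false) := by
      rw [relax1, hgx', hgy']
      simp [hcond]
    rw [hred]
    refine ⟨inv, ?_, ?_⟩
    · intro _
      refine ⟨rfl, ?_⟩
      intro dx' dy' hdx' hdy' h0
      rw [hgx'] at hdx'
      rw [hgy'] at hdy'
      have e1 := Option.some.inj hdx'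
      have e2 := Option.some.inj hdy'
      subst e1; subst e2
      have h2 : ¬(dy < 0) ∧ ¬(dx + 1 < dy) :=
        ⟨fun hh => hcond ⟨h0, Or.inl hh⟩, fun hh => hcond ⟨h0, Or.inr hh⟩⟩
      omega
    · intro h
      simp at h

theorem foldBF_spec (g : PySem.Dict Int (List Int)) (K : List Int) (dest : Int) (m : Nat)
    (L : List Int) (ctx : Ctx g K dest m) (fl : AFinal g K dest m L) :
    ∀ (rds : List (Int × Int)) (D : List Int) (flag : Bool),
      (∀ p ∈ rds, Adj g p.1 p.2 ∧ Adj g p.2 p.1 ∧ p.1 ∈ K ∧ p.2 ∈ K) →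
      BInv K dest m L D →
      BInv K dest m L (rds.foldl relaxEdge (D, flag)).1 ∧
      mu m (rds.foldl relaxEdge (D, flag)).1 ≤ mu m D ∧
      ((rds.foldl relaxEdge (D, flag)).2 = false →
          flag = false ∧ (rds.foldl relaxEdge (D, flag)).1 = D ∧
          ∀ p ∈ rds, NR D p.1 p.2 ∧ NR D p.2 p.1) ∧
      (flag = false → (rds.foldl relaxEdge (D, flag)).2 = true →
          mu m (rds.foldl relaxEdge (D, flag)).1 < mu m D) := by
  intro rds
  induction rds with
  | nil =>
      intro D flag _ inv
      refine ⟨inv, le_refl _, ?_, ?_⟩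
      · intro h
        exact ⟨h, rfl, by simp⟩
      · intro h1 h2
        rw [h1] at h2
        exact absurd h2 (by simp)
  | cons pr rds ih =>
      intro D flag hE inv
      obtain ⟨hadj1, hadj2, h1K, h2K⟩ := hE pr (List.mem_cons_self ..)
      obtain ⟨inv1, hfalse1, htrue1⟩ :=
        relax1_spec g K dest m L ctx fl D pr.1 pr.2 h1K h2K hadj1 inv
      obtain ⟨inv2, hfalse2, htrue2⟩ :=
        relax1_spec g K dest m L ctx fl (relax1 D pr.1 pr.2).1 pr.2 pr.1 h2K h1K hadj2 inv1
      have hle1 : mu m (relax1 D pr.1 pr.2).1 ≤ mu m D := by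
        cases hf : (relax1 D pr.1 pr.2).2 with
        | false => rw [(hfalse1 hf).1]
        | true => exact le_of_lt (htrue1 hf)
      have hle2 : mu m (relax1 (relax1 D pr.1 pr.2).1 pr.2 pr.1).1 ≤ mu m (relax1 D pr.1 pr.2).1 := by
        cases hf : (relax1 (relax1 D pr.1 pr.2).1 pr.2 pr.1).2 with
        | false => rw [(hfalse2 hf).1]
        | true => exact le_of_lt (htrue2 hf)
      have hstep : relaxEdge (D, flag) pr =
          ((relax1 (relax1 D pr.1 pr.2).1 pr.2 pr.1).1,
            flag || (relax1 D pr.1 pr.2).2 || (relax1 (relax1 D pr.1 pr.2).1 pr.2 pr.1).2) := rfl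
      rw [List.foldl_cons, hstep]
      obtain ⟨invF, hmuF, hfalseF, htrueF⟩ :=
        ih (relax1 (relax1 D pr.1 pr.2).1 pr.2 pr.1).1
          (flag || (relax1 D pr.1 pr.2).2 || (relax1 (relax1 D pr.1 pr.2).1 pr.2 pr.1).2)
          (fun p hp => hE p (List.mem_cons_of_mem _ hp)) inv2
      refine ⟨invF, le_trans hmuF (le_trans hle2 hle1), ?_, ?_⟩
      · intro hff
        obtain ⟨hflag2, heqF, hNRrds⟩ := hfalseF hff
        have hb : flag = false ∧ (relax1 D pr.1 pr.2).2 = false ∧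
            (relax1 (relax1 D pr.1 pr.2).1 pr.2 pr.1).2 = false := by
          rcases Bool.or_eq_false_iff.1 hflag2 with ⟨hab, hc⟩
          rcases Bool.or_eq_false_iff.1 hab with ⟨ha, hb⟩
          exact ⟨ha, hb, hc⟩
        obtain ⟨hfl, hr1, hr2⟩ := hb
        obtain ⟨he1, hnr1⟩ := hfalse1 hr1
        obtain ⟨he2, hnr2⟩ := hfalse2 hr2
        rw [he1] at hnr2
        refine ⟨hfl, by rw [heqF, he2, he1], ?_⟩
        intro p hp
        rcases List.mem_cons.1 hp with h | h
        · subst h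
          exact ⟨hnr1, hnr2⟩
        · have := hNRrds p h
          rw [he2, he1] at this
          exact this
      · intro hfl hft
        subst hfl
        cases hb : ((relax1 D pr.1 pr.2).2 || (relax1 (relax1 D pr.1 pr.2).1 pr.2 pr.1).2) with
        | true =>
            have hstrict : mu m (relax1 (relax1 D pr.1 pr.2).1 pr.2 pr.1).1 < mu m D := by
              rcases Bool.or_eq_true_iff.1 hb with h | h
              · exact lt_of_le_of_lt hle2 (htrue1 h)
              · exact lt_of_lt_of_le (htrue2 h) hle1
            exact lt_of_le_of_lt hmuF hstrict
        | false =>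
            rcases Bool.or_eq_false_iff.1 hb with ⟨h1, h2⟩
            have he1 := (hfalse1 h1).1
            have he2 := (hfalse2 h2).1
            have hfl2 : (false || (relax1 D pr.1 pr.2).2 || (relax1 (relax1 D pr.1 pr.2).1 pr.2 pr.1).2) = false := by
              simp [h1, h2]
            have := htrueF hfl2 hft
            rw [he2, he1] at this ⊢
            exact this

theorem loopBF_spec (g : PySem.Dict Int (List Int)) (K : List Int) (dest : Int) (m : Nat)
    (L : List Int) (roads : List (Int × Int)) (ctx : Ctx g K dest m) (fl : AFinal g K dest m L)
    (hE : ∀ p ∈ roads, Adj g p.1 p.2 ∧ Adj g p.2 p.1 ∧ p.1 ∈ K ∧ p.2 ∈ K) :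
    ∀ (fuel : Nat) (D : List Int), BInv K dest m L D → mu m D < (fuel : Int) →
      BInv K dest m L (loopBF roads fuel D) ∧
      ∀ p ∈ roads, NR (loopBF roads fuel D) p.1 p.2 ∧ NR (loopBF roads fuel D) p.2 p.1 := by
  intro fuel
  induction fuel with
  | zero =>
      intro D inv hmu
      have := mu_nonneg m D
      exfalso
      simp at hmu
      omega
  | succ fuel ih =>
      intro D inv hmu
      obtain ⟨invR, hmuR, hfalse, htrue⟩ := foldBF_spec g K dest m L ctx fl roads D false hE inv
      have hred : loopBF roads (fuel + 1) D =
          if (roundBF roads D).2 then loopBF roads fuel (roundBF roads D).1 else (roundBF roads D).1 := rfl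
      have hrr : roundBF roads D = roads.foldl relaxEdge (D, false) := rfl
      rw [hred]
      cases hf : (roundBF roads D).2 with
      | true =>
          simp only [if_true]
          have hstrict : mu m (roundBF roads D).1 < mu m D := by
            rw [hrr]
            exact htrue rfl (by rw [← hrr]; exact hf)
          refine ih (roundBF roads D).1 (by rw [hrr]; exact invR) ?_
          push_cast at hmu ⊢
          omega
      | false =>
          simp only [if_false, Bool.false_eq_true]
          obtain ⟨_, heq, hNR⟩ := hfalse (by rw [← hrr]; exact hf)
          rw [hrr, heq]
          exact ⟨inv, hNR⟩

theorem BF_upper (g : PySem.Dict Int (List Int)) (K : List Int) (dest : Int) (m : Nat)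
    (L D : List Int) (roads : List (Int × Int)) (ctx : Ctx g K dest m) (fl : AFinal g K dest m L)
    (inv : BInv K dest m L D)
    (hg : ∀ u w, Adj g u w → (u, w) ∈ roads ∨ (w, u) ∈ roads)
    (hNR : ∀ p ∈ roads, NR D p.1 p.2 ∧ NR D p.2 p.1) :
    ∀ (e : Nat) (p : Nat) (c : Int), L[p]? = some c → c = (e : Int) → D[p]? = some c := by
  intro e
  induction e using Nat.strong_induction_on with
  | _ e ih =>
    intro p c hc hce
    rcases Nat.eq_zero_or_pos e with he | he
    · subst he
      have hc0 : c = 0 := by exact_mod_cast hce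
      subst hc0
      have hpd : p = posOf m dest := fl.zOnly p hc
      subst hpd
      have hdr := ctx.keysRange dest ctx.destK
      have hz := inv.dZero
      rw [pyGet?_pos m D dest inv.len hdr.1 hdr.2] at hz
      exact hz
    · have hc1 : 1 ≤ c := by rw [hce]; exact_mod_cast he
      obtain ⟨u, w, hadj, hposw, hpu, h0⟩ := fl.par p c hc hc1
      obtain ⟨huK, hwK⟩ := ctx.adjK u w hadj
      have hur := ctx.keysRange u huK
      have hwr := ctx.keysRange w hwK
      have hLu : L[posOf m u]? = some (c - 1) := by
        rw [← pyGet?_pos m L u fl.len hur.1 hur.2]; exact hpu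
      have hcm1 : c - 1 = ((e - 1 : Nat) : Int) := by
        push_cast [Nat.cast_sub (by omega : 1 ≤ e)] at hce ⊢
        omega
      have hDu := ih (e - 1) (by omega) (posOf m u) (c - 1) hLu hcm1
      have hDug : PySem.List.pyGet? D u = some (c - 1) := by
        rw [pyGet?_pos m D u inv.len hur.1 hur.2]; exact hDu
      obtain ⟨dw, hDw⟩ : ∃ dw, D[posOf m w]? = some dw :=
        ⟨_, List.getElem?_eq_getElem (inv.len ▸ posOf_lt m w hwr.1 hwr.2)⟩
      have hDwg : PySem.List.pyGet? D w = some dw := by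
        rw [pyGet?_pos m D w inv.len hwr.1 hwr.2]; exact hDw
      have hnr : NR D u w := by
        rcases hg u w hadj with h | h
        · exact (hNR (u, w) h).1
        · exact (hNR (w, u) h).2
      obtain ⟨h0w, hlew⟩ := hnr (c - 1) dw hDug hDwg h0
      obtain ⟨lc, hLp, h0lc, hlelc⟩ := inv.lower (posOf m w) dw hDw h0w
      rw [hposw] at hDw hLp
      have hlcc : lc = c := by
        rw [hc] at hLp
        exact (Option.some.inj hLp).symm
      have hdwc : dw = c := by omega
      rw [hdwc] at hDw
      exact hDw

theorem BF_eq (g : PySem.Dict Int (List Int)) (K : List Int) (dest : Int) (m : Nat)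
    (L D : List Int) (roads : List (Int × Int)) (ctx : Ctx g K dest m) (fl : AFinal g K dest m L)
    (inv : BInv K dest m L D)
    (hg : ∀ u w, Adj g u w → (u, w) ∈ roads ∨ (w, u) ∈ roads)
    (hNR : ∀ p ∈ roads, NR D p.1 p.2 ∧ NR D p.2 p.1) :
    ∀ (p : Nat), p < m → D[p]? = L[p]? := by
  intro p hp
  obtain ⟨lc, hL⟩ : ∃ lc, L[p]? = some lc :=
    ⟨_, List.getElem?_eq_getElem (by rw [fl.len]; exact hp)⟩
  obtain ⟨dc, hD⟩ : ∃ dc, D[p]? = some dc :=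
    ⟨_, List.getElem?_eq_getElem (by rw [inv.len]; exact hp)⟩
  by_cases h0 : 0 ≤ lc
  · have := BF_upper g K dest m L D roads ctx fl inv hg hNR lc.toNat p lc hL
      (Int.toNat_of_nonneg h0).symm
    rw [this, hL]
  · have hneg : lc < 0 := by omega
    have h1 := fl.lb p lc hL
    have h2 := inv.lb p dc hD
    by_cases h3 : 0 ≤ dc
    · obtain ⟨lc', hL', h0', _⟩ := inv.lower p dc hD h3
      rw [hL] at hL'
      have := Option.some.inj hL'
      omega
    · have h4 : dc < 0 := by omega
      have e1 : dc = -1 := by omega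
      have e2 : lc = -1 := by omega
      rw [hD, hL, e1, e2]

theorem initBInv (g : PySem.Dict Int (List Int)) (K : List Int) (dest : Int) (m : Nat)
    (L : List Int) (ctx : Ctx g K dest m) (fl : AFinal g K dest m L) :
    BInv K dest m L (PySem.List.pySetD (List.replicate m (-1)) dest 0) := by
  have hr := ctx.keysRange dest ctx.destK
  have hlrep : (List.replicate m (-1 : Int)).length = m := by simp
  have hset : PySem.List.pySetD (List.replicate m (-1 : Int)) dest 0 =
      (List.replicate m (-1 : Int)).set (posOf m dest) 0 :=
    pySetD_pos m _ dest 0 hlrep hr.1 hr.2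
  set pd := posOf m dest with hpd
  have hpdlt : pd < m := posOf_lt m dest hr.1 hr.2
  set D0 := PySem.List.pySetD (List.replicate m (-1 : Int)) dest 0 with hD0
  have hlen : D0.length = m := by rw [hset, List.length_set, hlrep]
  have hentry : ∀ p : Nat, D0[p]? = if p = pd then some 0 else (if p < m then some (-1) else none) := by
    intro p
    by_cases hp : p = pd
    · subst hp
      rw [hset, List.getElem?_set_self (by rw [hlrep]; exact hpdlt)]
      simp
    · rw [hset, List.getElem?_set_ne (fun hh => hp hh.symm), replicate_entry]
      simp [hp]
  have hdz : PySem.List.pyGet? D0 dest = some 0 := by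
    rw [pyGet?_pos m D0 dest hlen hr.1 hr.2, hentry, if_pos rfl]
  have hfin1 : 0 < finCount D0 := by
    refine List.countP_pos_iff.2 ⟨0, ?_, by simp⟩
    exact List.mem_of_getElem? (by rw [hentry pd, if_pos rfl])
  refine ⟨hlen, ?_, hdz, ?_, ?_⟩
  · intro p c hc
    rw [hentry] at hc
    split_ifs at hc <;> (have := Option.some.inj hc; omega)
  · intro p c hc h0
    rw [hentry] at hc
    split_ifs at hc with hp1
    · have hceq := Option.some.inj hc
      subst hp1
      refine ⟨0, ?_, le_refl 0, by omega⟩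
      rw [← pyGet?_pos m L dest fl.len hr.1 hr.2]
      exact fl.dZero
    · have := Option.some.inj hc
      omega
  · intro p c hc h0
    rw [hentry] at hc
    split_ifs at hc with hp1
    · have hceq := Option.some.inj hc
      omega
    · have := Option.some.inj hc
      omega

theorem posOf_toInt (m : Nat) (x : Int) (h1 : -(m : Int) ≤ x) (h2 : x < (m : Int)) :
    ((posOf m x : Nat) : Int) = if x < 0 then x + m else x := by
  unfold posOf
  split_ifs <;> omega

theorem mem_keys_of_road (roads : List (Int × Int)) (destination : Int) (p : Int × Int)
    (hp : p ∈ roads) : p.1 ∈ Keys roads destination ∧ p.2 ∈ Keys roads destination := by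
  constructor <;>
    exact List.mem_cons_of_mem _ (List.mem_flatMap.2 ⟨p, hp, by simp⟩)

theorem solution_spec : Claim_equal_solution := by
  unfold Claim_equal_solution
  intro n roads sources destination _ hpre
  obtain ⟨hn, hdr0, hroads, hsrc, hinj⟩ := hpre
  simp only [Spec_solution, solution, solution_alt]
  set m := (n + 1).toNat with hm
  have hmi : ((m : Nat) : Int) = n + 1 := Int.toNat_of_nonneg (by omega)
  set g := buildGraph roads with hg
  set K := Keys roads destination with hK
  have hrange : ∀ x : Int, -(n + 1) ≤ x → x ≤ n → -(m : Int) ≤ x ∧ x < (m : Int) := by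
    intro x a b
    rw [hmi]
    omega
  have hKrange : ∀ x ∈ K, -(m : Int) ≤ x ∧ x < (m : Int) := by
    intro x hx
    rw [hK] at hx
    rcases List.mem_cons.1 hx with rfl | hx
    · exact hrange _ hdr0.1 hdr0.2
    · obtain ⟨p, hp, hxp⟩ := List.mem_flatMap.1 hx
      have hb := hroads p hp
      simp only [List.mem_cons, List.not_mem_nil, or_false] at hxp
      rcases hxp with rfl | rfl
      · exact hrange _ hb.1.1 hb.1.2
      · exact hrange _ hb.2.1 hb.2.2
  have hdestK : destination ∈ K := by rw [hK]; exact List.mem_cons_self ..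
  have ctx : Ctx g K destination m := by
    refine ⟨by omega, hdestK, hKrange, ?_, ?_⟩
    · intro x hx y hy hpos
      have hxr := hKrange x hx
      have hyr := hKrange y hy
      apply hinj x (hK ▸ hx) y (hK ▸ hy)
      have e1 := posOf_toInt m x hxr.1 hxr.2
      have e2 := posOf_toInt m y hyr.1 hyr.2
      rw [hpos, e2] at e1
      rw [hmi] at e1
      unfold cellId
      split_ifs at e1 ⊢ <;> omega
    · intro u w hadj
      have hm2 := (mem_buildGraph roads u w).1 hadj
      rcases hm2 with h | h
      · have := mem_keys_of_road roads destination _ h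
        exact ⟨hK ▸ this.1, hK ▸ this.2⟩
      · have := mem_keys_of_road roads destination _ h
        exact ⟨hK ▸ this.2, hK ▸ this.1⟩
  set vis1 := PySem.List.pySetD (List.replicate m (-1 : Int)) destination 0 with hvis1
  have hvlen : vis1.length = m := by
    rw [hvis1, PySem.List.length_pySetD, List.length_replicate]
  rw [show vis1.length + 1 = m + 1 by rw [hvlen]]
  set L := loopA g (m + 1) [destination] vis1 with hL
  have fl : AFinal g K destination m L := by
    refine loopA_final g K destination m ctx (m + 1) [destination] vis1
      (initAInv g K destination m ctx) ?_
    have := negCount_le_length vis1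
    simp only [List.length_singleton]
    omega
  have inv0 : BInv K destination m L vis1 := initBInv g K destination m L ctx fl
  have hmu0 : mu m vis1 ≤ (m : Int) * m := by
    have hb : ∀ x ∈ vis1, rank m x ≤ (m : Int) := by
      intro x hx
      have hset : vis1 = (List.replicate m (-1 : Int)).set (posOf m destination) 0 := by
        rw [hvis1]
        exact pySetD_pos m _ destination 0 (by simp) (hKrange destination hdestK).1
          (hKrange destination hdestK).2
      rw [hset] at hx
      rcases List.mem_or_eq_of_mem_set hx with hx' | rfl
      · have := List.eq_of_mem_replicate hx'
        subst this
        unfold rank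
        simp
      · unfold rank
        split_ifs <;> omega
    have := mu_le m vis1 hb
    rw [hvlen] at this
    exact this
  have hEok : ∀ p ∈ roads, Adj g p.1 p.2 ∧ Adj g p.2 p.1 ∧ p.1 ∈ K ∧ p.2 ∈ K := by
    intro p hp
    have h1 := (mem_buildGraph roads p.1 p.2).2 (Or.inl hp)
    have h2 := (mem_buildGraph roads p.2 p.1).2 (Or.inr hp)
    have h3 := mem_keys_of_road roads destination p hp
    exact ⟨h1, h2, hK ▸ h3.1, hK ▸ h3.2⟩
  have hfuel : mu m vis1 < ((((n + 1) * (n + 1)).toNat + 1 : Nat) : Int) := by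
    have h1 : (((n + 1) * (n + 1)).toNat : Int) = (n + 1) * (n + 1) :=
      Int.toNat_of_nonneg (mul_self_nonneg _)
    have h2 : (m : Int) * (m : Int) = (n + 1) * (n + 1) := by rw [hmi]
    rw [h2] at hmu0
    rw [Nat.cast_add, Nat.cast_one, h1]
    exact lt_of_le_of_lt hmu0 (lt_add_one _)
  obtain ⟨invF, hNRF⟩ := loopBF_spec g K destination m L roads ctx fl hEok
    (((n + 1) * (n + 1)).toNat + 1) vis1 inv0 hfuel
  set Dfin := loopBF roads (((n + 1) * (n + 1)).toNat + 1) vis1 with hDfin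
  have heqP : ∀ (p : Nat), p < m → Dfin[p]? = L[p]? :=
    BF_eq g K destination m L Dfin roads ctx fl invF
      (fun u w h => (mem_buildGraph roads u w).1 h) hNRF
  refine List.map_congr_left ?_
  intro s hs
  have hsr := hrange s (hsrc s hs).1 (hsrc s hs).2
  have hplt : posOf m s < m := posOf_lt m s hsr.1 hsr.2
  rw [pyGet?_pos m L s fl.len hsr.1 hsr.2, pyGet?_pos m Dfin s invF.len hsr.1 hsr.2,
    heqP (posOf m s) hplt]
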